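-- pv_equiv track=rewrite | github.com/Aman-py/Hackerearth | Basic Programming/Lucky_NUM2.py | countsetbits
-- ===== SOURCE A (Python) =====
-- def countsetbits(n):
--     count = 0
--     while n:
--         count += n&1
--         n >>= 1
--         if count == 2:
--             return True
--     return False
-- ===== SOURCE B (Python) =====
-- def countsetbits(n):
--     # >=2 set bits iff clearing the lowest set bit leaves a nonzero value
--     return (n & (n - 1)) != 0
-- ===== Notes on version B (the rewrite author's own statement) =====
-- stated objective: simpler
-- what changed: Replaces the bit-by-bit counting loop with the closed-form Brian-Kernighan test (n & (n-1)) != 0, which is nonzero exactly when n has at least two set bits (negatives always do in two's complement).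
import Mathlib
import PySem

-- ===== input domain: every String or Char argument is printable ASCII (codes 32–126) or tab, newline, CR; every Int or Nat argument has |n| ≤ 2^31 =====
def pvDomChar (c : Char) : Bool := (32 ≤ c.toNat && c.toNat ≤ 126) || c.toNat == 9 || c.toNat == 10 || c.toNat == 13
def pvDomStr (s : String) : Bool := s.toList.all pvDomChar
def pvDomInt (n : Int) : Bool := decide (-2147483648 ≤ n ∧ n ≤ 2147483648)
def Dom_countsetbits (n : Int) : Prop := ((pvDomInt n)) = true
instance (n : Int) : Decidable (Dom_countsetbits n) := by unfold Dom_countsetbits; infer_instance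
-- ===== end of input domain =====

-- B replaces A's bit-by-bit counting loop by the single closed-form test (n & (n-1)) != 0.

-- ===== PORT A =====
-- termination helper for the literal loop: n & 1 is n's parity bit
theorem pv_band_one_val (n : Int) : PySem.Int.band n 1 = n % 2 := by
  rw [PySem.Int.band_one]; simp [PySem.Int.mod, Int.fmod_eq_emod]

-- n >> 1 is floor division by 2 (used only to justify termination and in proofs)
theorem pv_shiftRight_one (n : Int) : n >>> (1:Nat) = n / 2 := by
  cases n with
  | ofNat m =>
      show Int.ofNat (m >>> 1) = _
      rw [Nat.shiftRight_eq_div_pow]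
      simp [Int.ofNat_eq_natCast]
  | negSucc m =>
      show Int.negSucc (m >>> 1) = _
      rw [Nat.shiftRight_eq_div_pow, Int.negSucc_eq]
      push_cast
      omega

-- the `while n:` loop of A, with its two mutable variables as parameters
-- (the invariant 0 ≤ count < 2 is exactly what A maintains and is needed for termination)
def countsetbitsLoop (n count : Int) (h : 0 ≤ count ∧ count < 2) : Bool :=
  if hn : n = 0 then false
  else if hc : count + PySem.Int.band n 1 = 2 then true
  else countsetbitsLoop (n >>> (1:Nat)) (count + PySem.Int.band n 1)
        ⟨by have := pv_band_one_val n; omega, by have := pv_band_one_val n; omega⟩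
termination_by ((2 - count).toNat, n.natAbs)
decreasing_by
  have hb := pv_band_one_val n
  have h2 : n % 2 = 0 ∨ n % 2 = 1 := by omega
  rcases h2 with h2 | h2
  · rw [hb, h2]
    have hs : (n >>> (1:Nat)).natAbs < n.natAbs := by
      rw [pv_shiftRight_one]; omega
    simpa using Prod.Lex.right ((2 - count).toNat) hs
  · exact Prod.Lex.left _ _ (by omega)

def countsetbits (n : Int) : Bool := countsetbitsLoop n 0 ⟨by omega, by omega⟩

-- ===== PORT B =====
def countsetbits_alt (n : Int) : Bool := PySem.Int.band n (n - 1) != 0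

-- ===== PRECONDITION & SPEC =====
def Spec_countsetbits (n : Int) (out : Bool) : Prop := out = countsetbits_alt n
instance (n : Int) (out : Bool) : Decidable (Spec_countsetbits n out) := by unfold Spec_countsetbits; infer_instance

-- ===== CLAIM (what is proved, stated in full; the proofs are below) =====
def Claim_equal_countsetbits : Prop := ∀ (n : Int), Dom_countsetbits n → Spec_countsetbits n (countsetbits n)

-- ===== LEMMAS AND PROOFS =====

theorem pv_land_self (k : Nat) : k &&& k = k := by
  apply Nat.eq_of_testBit_eq; intro i; simp

theorem pv_land_odd (k : Nat) : (2*k+1) &&& (2*k) = 2*k := by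
  have hs : Nat.bitwise and k k = k := by
    simpa [HAnd.hAnd, AndOp.and, Nat.land] using pv_land_self k
  have h := Nat.bitwise_bit (f := and) (by rfl) true k false k
  simp [Nat.bit, hs] at h
  simpa [HAnd.hAnd, AndOp.and, Nat.land] using h

theorem pv_land_even (k : Nat) (hk : 1 ≤ k) : (2*k) &&& (2*k-1) = 2*(k &&& (k-1)) := by
  have h := Nat.bitwise_bit (f := and) (by rfl) false k true (k-1)
  simp [Nat.bit] at h
  have e : 2*(k-1)+1 = 2*k-1 := by omega
  rw [e] at h
  simpa [HAnd.hAnd, AndOp.and, Nat.land] using h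

theorem pv_band_pos (n : Int) (hn : 0 < n) :
    PySem.Int.band n (n - 1) = ((n.toNat &&& (n.toNat - 1) : Nat) : Int) := by
  have h1 : (0:Int) ≤ n := by omega
  have h3 : (n - 1).toNat = n.toNat - 1 := by omega
  unfold PySem.Int.band
  rw [if_pos h1, if_pos (by omega : (0:Int) ≤ n - 1), h3]

theorem pv_band_neg (n : Int) (hn : n < 0) : PySem.Int.band n (n - 1) < 0 := by
  have h1 : ¬ (0:Int) ≤ n := by omega
  have h2 : ¬ (0:Int) ≤ n - 1 := by omega
  simp [PySem.Int.band, h1]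
  omega

-- B's test as a proposition
theorem pv_alt_iff (n : Int) : countsetbits_alt n = decide (PySem.Int.band n (n - 1) ≠ 0) := by
  by_cases h : PySem.Int.band n (n - 1) = 0 <;> simp [countsetbits_alt, h]

-- the loop with count = 1 returns true iff n ≠ 0
theorem pv_loopP : ∀ (m : Nat) (n : Int), n.natAbs = m →
    ∀ p, countsetbitsLoop n 1 p = decide (n ≠ 0) := by
  intro m
  induction m using Nat.strong_induction_on with
  | _ m ih =>
    intro n hm p
    rw [countsetbitsLoop]
    by_cases hn : n = 0
    · simp [hn]
    · have hb := pv_band_one_val n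
      have h2 : n % 2 = 0 ∨ n % 2 = 1 := by omega
      rcases h2 with h2 | h2
      · have hne : (1:Int) + PySem.Int.band n 1 ≠ 2 := by omega
        have hs : (n >>> (1:Nat)) = n / 2 := pv_shiftRight_one n
        have hlt : (n >>> (1:Nat)).natAbs < m := by rw [hs]; omega
        simp only [hn, hb, h2, add_zero, dite_false]
        rw [dif_neg (show ¬(1:Int) = 2 by omega), ih _ hlt _ rfl]
        have hnz : n / 2 ≠ 0 := by omega
        simp [hs, hnz, hn]
      · have heq : (1:Int) + PySem.Int.band n 1 = 2 := by omega
        simp [hn, heq]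

-- the loop with count = 0 computes B's test
theorem pv_loopQ : ∀ (m : Nat) (n : Int), n.natAbs = m →
    ∀ p, countsetbitsLoop n 0 p = decide (PySem.Int.band n (n - 1) ≠ 0) := by
  intro m
  induction m using Nat.strong_induction_on with
  | _ m ih =>
    intro n hm p
    rw [countsetbitsLoop]
    by_cases hn : n = 0
    · subst hn; simp
    · have hb := pv_band_one_val n
      have h2 : n % 2 = 0 ∨ n % 2 = 1 := by omega
      have hne : (0:Int) + PySem.Int.band n 1 ≠ 2 := by omega
      have hs : (n >>> (1:Nat)) = n / 2 := pv_shiftRight_one n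
      rcases h2 with h2 | h2
      · -- n even: recurse with count = 0; both tests halve
        have hlt : (n >>> (1:Nat)).natAbs < m := by rw [hs]; omega
        simp only [hn, hb, h2, add_zero, dite_false]
        rw [dif_neg (show ¬(0:Int) = 2 by omega), ih _ hlt _ rfl, hs]
        rcases lt_trichotomy n 0 with hneg | hz | hpos
        · have hn2 : n / 2 < 0 := by omega
          have b1 := pv_band_neg n hneg
          have b2 := pv_band_neg (n/2) hn2
          simp [show PySem.Int.band n (n-1) ≠ 0 by omega,
                show PySem.Int.band (n/2) (n/2-1) ≠ 0 by omega]
        · omega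
        · have hp2 : 0 < n / 2 := by omega
          have b1 := pv_band_pos n hpos
          have b2 := pv_band_pos (n/2) hp2
          have hk : n.toNat = 2 * (n/2).toNat := by omega
          have hk1 : 1 ≤ (n/2).toNat := by omega
          rw [b1, b2, hk, pv_land_even _ hk1]
          simp
      · -- n odd: count becomes 1; recurse via pv_loopP
        simp only [hn, hb, h2, zero_add, dite_false]
        rw [dif_neg (show ¬(1:Int) = 2 by omega), pv_loopP _ _ rfl _, hs]
        rcases lt_trichotomy n 0 with hneg | hz | hpos
        · have hn2 : n / 2 < 0 := by omega
          have b1 := pv_band_neg n hneg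
          simp [show PySem.Int.band n (n-1) ≠ 0 by omega, show n / 2 ≠ 0 by omega]
        · omega
        · have b1 := pv_band_pos n hpos
          have hk : n.toNat = 2 * (n/2).toNat + 1 := by omega
          rw [b1, hk]
          have : 2 * (n/2).toNat + 1 - 1 = 2 * (n/2).toNat := by omega
          rw [this, pv_land_odd, decide_eq_decide]
          omega

-- ===== VERDICT (by name: the statement is the Claim_ definition above) =====
theorem countsetbits_spec : Claim_equal_countsetbits := by
  intro n _
  show countsetbits n = countsetbits_alt n
  rw [countsetbits, pv_loopQ n.natAbs n rfl, pv_alt_iff]
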